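-- pv_equiv track=rewrite | github.com/dhilanpatel26/singing_boxes | simulations/simulation.py | check_overlap
-- ===== SOURCE A (Python) =====
-- def check_overlap(transmissions):
--     for i in range(len(transmissions)):
--         device_transmissions = transmissions[i]
--         for start_time, end_time in device_transmissions:
--             overlap = False
--             for j in range(len(transmissions)):
--                 if i != j:
--                     for other_start, other_end in transmissions[j]:
--                         if other_start < end_time and other_end > start_time:
--                             overlap = True
--                             break
--             if not overlap:
--                 return True
--     return False
-- ===== SOURCE B (Python) =====
-- def check_overlap(transmissions):
--     tagged = [(s, e, i) for i, dev in enumerate(transmissions) for s, e in dev]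
--     by_start = sorted(tagged, key=lambda t: t[0])
--     by_end = sorted(tagged, key=lambda t: t[1])
--     top1 = None  # (max end among processed events, device of the first event attaining it)
--     top2 = None  # max end among processed events whose device differs from top1's
--     p = 0
--     for s, e, i in by_end:
--         while p < len(by_start) and by_start[p][0] < e:
--             ue, ud = by_start[p][1], by_start[p][2]
--             if top1 is None:
--                 top1 = (ue, ud)
--             elif ue > top1[0]:
--                 if ud != top1[1]:
--                     top2 = top1[0] if top2 is None else max(top2, top1[0])
--                 top1 = (ue, ud)
--             elif ud != top1[1]:
--                 top2 = ue if top2 is None else max(top2, ue)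
--             p += 1
--         if top1 is None:
--             return True
--         e1, d1 = top1
--         best = e1 if d1 != i else top2
--         if best is None or best <= s:
--             return True
--     return False
-- ===== Notes on version B (the rewrite author's own statement) =====
-- stated objective: alternative
-- what changed: Replaces A's all-pairs overlap scan by an offline sweep: tag every interval with its device, sort by start and by end, and answer each interval's 'does any other device overlap me?' query from a running top-two maximum of end-times held by distinct devices (avoids rescanning all intervals per candidate).
import Mathlib
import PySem

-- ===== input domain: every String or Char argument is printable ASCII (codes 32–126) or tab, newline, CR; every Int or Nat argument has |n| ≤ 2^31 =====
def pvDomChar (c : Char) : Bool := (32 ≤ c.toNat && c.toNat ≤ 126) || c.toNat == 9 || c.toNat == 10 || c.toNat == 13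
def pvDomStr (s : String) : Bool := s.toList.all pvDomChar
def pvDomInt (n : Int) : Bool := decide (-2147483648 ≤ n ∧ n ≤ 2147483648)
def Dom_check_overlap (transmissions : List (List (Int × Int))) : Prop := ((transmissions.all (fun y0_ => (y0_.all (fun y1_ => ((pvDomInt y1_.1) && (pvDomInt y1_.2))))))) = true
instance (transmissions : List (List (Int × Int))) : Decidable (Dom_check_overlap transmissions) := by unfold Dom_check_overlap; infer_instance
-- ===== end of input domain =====

-- B answers the same question by a different algorithm: instead of A's all-pairs scan, it tags
-- every interval with its device, sorts by start and by end, and answers each "is this interval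
-- overlap-free?" query from a running top-two maximum of end-times held by distinct devices.

-- ===== PORT A =====
-- inner `for other_start, other_end in transmissions[j]` with its break
def aScanOther (s e : Int) : List (Int × Int) → Bool
  | [] => false
  | (os, oe) :: rest => if os < e ∧ oe > s then true else aScanOther s e rest

-- `for j in range(len(transmissions))` carrying the `overlap` flag (indices via enumerate)
def aLoopJ (i s e : Int) (acc : Bool) : List (Int × List (Int × Int)) → Bool
  | [] => acc
  | (j, dev) :: rest => aLoopJ i s e (if i ≠ j then (acc || aScanOther s e dev) else acc) rest

-- `for start_time, end_time in device_transmissions` with its `return True`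
def aLoopInts (i : Int) (en : List (Int × List (Int × Int))) : List (Int × Int) → Bool
  | [] => false
  | (s, e) :: rest => if !(aLoopJ i s e false en) then true else aLoopInts i en rest

-- `for i in range(len(transmissions))`
def aOuter (en : List (Int × List (Int × Int))) : List (Int × List (Int × Int)) → Bool
  | [] => false
  | (i, dev) :: rest => if aLoopInts i en dev then true else aOuter en rest

def check_overlap (transmissions : List (List (Int × Int))) : Bool :=
  aOuter (PySem.List.enumerate transmissions) (PySem.List.enumerate transmissions)

-- ===== PORT B =====
-- events are (start, end, device)
def bTagged (transmissions : List (List (Int × Int))) : List (Int × Int × Int) :=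
  (PySem.List.enumerate transmissions).flatMap (fun p => p.2.map (fun q => (q.1, q.2, p.1)))

-- state: (top1 = (max end so far, its device), top2 = max end over the other devices)
def bStep (st : Option (Int × Int) × Option Int) (u : Int × Int × Int) :
    Option (Int × Int) × Option Int :=
  match st.1 with
  | none => (some (u.2.1, u.2.2), st.2)
  | some (e1, d1) =>
    if e1 < u.2.1 then
      (some (u.2.1, u.2.2),
       if u.2.2 ≠ d1 then some (match st.2 with | none => e1 | some e2 => max e2 e1) else st.2)
    else if u.2.2 ≠ d1 then
      (st.1, some (match st.2 with | none => u.2.1 | some e2 => max e2 u.2.1))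
    else st

-- `while p < len(by_start) and by_start[p][0] < e: … p += 1`
def bAdvance (e : Int) (rs : List (Int × Int × Int)) (st : Option (Int × Int) × Option Int) :
    List (Int × Int × Int) × (Option (Int × Int) × Option Int) :=
  match rs with
  | [] => ([], st)
  | u :: rest => if u.1 < e then bAdvance e rest (bStep st u) else (u :: rest, st)

-- `for s, e, i in by_end: …`
def bLoop (qs : List (Int × Int × Int)) (rs : List (Int × Int × Int))
    (st : Option (Int × Int) × Option Int) : Bool :=
  match qs with
  | [] => false
  | q :: qs' =>
    let a := bAdvance q.2.1 rs st
    match a.2.1 with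
    | none => true
    | some (e1, d1) =>
      match (if d1 ≠ q.2.2 then some e1 else a.2.2) with
      | none => true
      | some b => if b ≤ q.1 then true else bLoop qs' a.1 a.2

def check_overlap_alt (transmissions : List (List (Int × Int))) : Bool :=
  let tagged := bTagged transmissions
  bLoop (PySem.List.sorted tagged (fun t => t.2.1)) (PySem.List.sorted tagged (fun t => t.1))
    (none, none)

-- ===== PRECONDITION & SPEC =====
def Spec_check_overlap (transmissions : List (List (Int × Int))) (out : Bool) : Prop := out = check_overlap_alt transmissions
instance (transmissions : List (List (Int × Int))) (out : Bool) : Decidable (Spec_check_overlap transmissions out) := by unfold Spec_check_overlap; infer_instance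

-- ===== CLAIM (what is proved, stated in full; the proofs are below) =====
def Claim_equal_check_overlap : Prop := ∀ (transmissions : List (List (Int × Int))), Dom_check_overlap transmissions → Spec_check_overlap transmissions (check_overlap transmissions)

-- ===== LEMMAS AND PROOFS =====

-- an event of `tg` is overlap-free iff no event of another device overlaps it
def freeB (tg : List (Int × Int × Int)) (t : Int × Int × Int) : Bool :=
  !(tg.any (fun u => u.2.2 ≠ t.2.2 && u.1 < t.2.1 && t.1 < u.2.1))

lemma aScanOther_eq (s e : Int) (l : List (Int × Int)) :
    aScanOther s e l = l.any (fun u => u.1 < e && s < u.2) := by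
  induction l with
  | nil => rfl
  | cons x rest ih =>
    obtain ⟨os, oe⟩ := x
    simp only [aScanOther, List.any_cons, ← ih]
    by_cases h : os < e ∧ oe > s
    · simp [h]
    · rw [if_neg h]
      rcases not_and_or.mp h with h1 | h1 <;> simp [h1]

lemma aLoopJ_eq (i s e : Int) (acc : Bool) (en : List (Int × List (Int × Int))) :
    aLoopJ i s e acc en = (acc || en.any (fun p => i ≠ p.1 && aScanOther s e p.2)) := by
  induction en generalizing acc with
  | nil => simp [aLoopJ]
  | cons x rest ih =>
    obtain ⟨j, dev⟩ := x
    simp only [aLoopJ, List.any_cons, ih]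
    by_cases h : i ≠ j
    · simp [h, Bool.or_assoc]
    · simp at h; simp [h]

lemma aLoopInts_eq (i : Int) (en : List (Int × List (Int × Int))) (l : List (Int × Int)) :
    aLoopInts i en l = l.any (fun q => !(aLoopJ i q.1 q.2 false en)) := by
  induction l with
  | nil => rfl
  | cons x rest ih =>
    obtain ⟨s, e⟩ := x
    simp only [aLoopInts, List.any_cons, ← ih]
    by_cases h : aLoopJ i s e false en <;> simp [h]

lemma aOuter_eq (en : List (Int × List (Int × Int))) (l : List (Int × List (Int × Int))) :
    aOuter en l = l.any (fun p => aLoopInts p.1 en p.2) := by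
  induction l with
  | nil => rfl
  | cons x rest ih =>
    obtain ⟨i, dev⟩ := x
    simp only [aOuter, List.any_cons, ← ih]
    by_cases h : aLoopInts i en dev <;> simp [h]

-- A computes exactly "some tagged event is overlap-free"
lemma checkA_eq_spec (ts : List (List (Int × Int))) :
    check_overlap ts = (bTagged ts).any (freeB (bTagged ts)) := by
  unfold check_overlap bTagged freeB
  rw [aOuter_eq]
  simp only [aLoopInts_eq, aLoopJ_eq, aScanOther_eq, Bool.false_or]
  rw [Bool.eq_iff_iff]
  simp only [List.any_eq_true, List.mem_flatMap, List.mem_map, Bool.not_eq_true',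
    List.any_eq_false, List.any_eq_true, Bool.and_eq_true, decide_eq_true_eq, ne_eq]
  constructor
  · rintro ⟨p, hp, q, hq, hno⟩
    refine ⟨(q.1, q.2, p.1), ⟨p, hp, q, hq, rfl⟩, ?_⟩
    rintro u ⟨r, hr, v, hv, rfl⟩ ⟨⟨hd, hs⟩, he⟩
    exact hno r hr ⟨fun h => hd h.symm, v, hv, hs, he⟩
  · rintro ⟨t, ⟨p, hp, q, hq, rfl⟩, hno⟩
    refine ⟨p, hp, q, hq, ?_⟩
    rintro r hr ⟨hne, v, hv, hs, he⟩
    exact hno (v.1, v.2, r.1) ⟨r, hr, v, hv, rfl⟩ ⟨⟨fun h => hne h.symm, hs⟩, he⟩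


-- `o` is the maximum of `l` (none iff l empty)
def IsMaxOf (o : Option Int) (l : List Int) : Prop :=
  match o with
  | none => l = []
  | some m => m ∈ l ∧ ∀ x ∈ l, x ≤ m

-- invariant of the sweep state over the processed events `done`
def StInv (done : List (Int × Int × Int)) (st : Option (Int × Int) × Option Int) : Prop :=
  match st.1 with
  | none => done = [] ∧ st.2 = none
  | some (e1, d1) =>
      (∃ u ∈ done, u.2.1 = e1 ∧ u.2.2 = d1) ∧ (∀ u ∈ done, u.2.1 ≤ e1) ∧
      IsMaxOf st.2 ((done.filter (fun u => u.2.2 ≠ d1)).map (fun u => u.2.1))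

lemma stInv_step {done : List (Int × Int × Int)} {st} (h : StInv done st)
    (u : Int × Int × Int) : StInv (done ++ [u]) (bStep st u) := by
  obtain ⟨t1, t2⟩ := st
  obtain ⟨us, ue, ud⟩ := u
  match t1 with
  | none =>
    obtain ⟨rfl, rfl⟩ := h
    refine ⟨⟨(us, ue, ud), by simp, rfl, rfl⟩, by simp, ?_⟩
    show IsMaxOf none _
    simp [IsMaxOf]
  | some (e1, d1) =>
    obtain ⟨⟨w, hw, hwe, hwd⟩, hb, hmax⟩ := h
    -- facts used across branches
    have hbound : ∀ x ∈ (done.filter (fun v => v.2.2 ≠ d1)).map (fun v => v.2.1), x ≤ e1 := by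
      intro x hx
      obtain ⟨v, hv, rfl⟩ := List.mem_map.mp hx
      exact hb v (List.mem_filter.mp hv).1
    by_cases h1 : e1 < ue
    · by_cases h2 : ud ≠ d1
      · -- new max end from a different device: top1 := (ue,ud), top2 := e1
        have hfe : ((done ++ [(us, ue, ud)]).filter (fun v => v.2.2 ≠ ud)).map (fun v => v.2.1)
            = (done.filter (fun v => v.2.2 ≠ ud)).map (fun v => v.2.1) := by
          simp [List.filter_append]
        have hmem : e1 ∈ (done.filter (fun v => v.2.2 ≠ ud)).map (fun v => v.2.1) :=
          List.mem_map.mpr ⟨w, List.mem_filter.mpr ⟨hw, by simp [hwd]; omega⟩, hwe⟩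
        have hb2 : ∀ x ∈ (done.filter (fun v => v.2.2 ≠ ud)).map (fun v => v.2.1), x ≤ e1 := by
          intro x hx
          obtain ⟨v, hv, rfl⟩ := List.mem_map.mp hx
          exact hb v (List.mem_filter.mp hv).1
        cases t2 with
        | none =>
          show StInv _ (bStep (some (e1, d1), none) (us, ue, ud))
          simp only [bStep, if_pos h1, if_pos h2]
          refine ⟨⟨(us, ue, ud), by simp, rfl, rfl⟩, fun v hv => ?_, ?_⟩
          · rcases List.mem_append.mp hv with hv | hv
            · have := hb v hv; omega
            · simp at hv; subst hv; simp
          · rw [show ((some (ue, ud), some e1) :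
                Option (Int × Int) × Option Int).2 = some e1 from rfl]
            rw [IsMaxOf, hfe]
            exact ⟨hmem, hb2⟩
        | some e2 =>
          show StInv _ (bStep (some (e1, d1), some e2) (us, ue, ud))
          simp only [bStep, if_pos h1, if_pos h2]
          have he2 : e2 ≤ e1 := hbound e2 hmax.1
          refine ⟨⟨(us, ue, ud), by simp, rfl, rfl⟩, fun v hv => ?_, ?_⟩
          · rcases List.mem_append.mp hv with hv | hv
            · have := hb v hv; omega
            · simp at hv; subst hv; simp
          · rw [show ((some (ue, ud), some (max e2 e1)) :
                Option (Int × Int) × Option Int).2 = some (max e2 e1) from rfl]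
            rw [IsMaxOf, hfe, max_eq_right he2]
            exact ⟨hmem, hb2⟩
      · -- new max end from the same device: top1 := (ue,ud), top2 unchanged
        rw [not_not] at h2
        subst h2
        show StInv _ (bStep (some (e1, ud), t2) (us, ue, ud))
        simp only [bStep, if_pos h1, if_neg (by simp : ¬ ud ≠ ud)]
        refine ⟨⟨(us, ue, ud), by simp, rfl, rfl⟩, fun v hv => ?_, ?_⟩
        · rcases List.mem_append.mp hv with hv | hv
          · have := hb v hv; omega
          · simp at hv; subst hv; simp
        · have hfe : ((done ++ [(us, ue, ud)]).filter (fun v => v.2.2 ≠ ud)).map (fun v => v.2.1)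
              = (done.filter (fun v => v.2.2 ≠ ud)).map (fun v => v.2.1) := by
            simp [List.filter_append]
          show IsMaxOf t2 _
          rw [hfe]
          exact hmax
    · by_cases h2 : ud ≠ d1
      · -- smaller end from another device: only top2 may grow
        have hfe : ((done ++ [(us, ue, ud)]).filter (fun v => v.2.2 ≠ d1)).map (fun v => v.2.1)
            = (done.filter (fun v => v.2.2 ≠ d1)).map (fun v => v.2.1) ++ [ue] := by
          simp [List.filter_append, h2]
        cases t2 with
        | none =>
          show StInv _ (bStep (some (e1, d1), none) (us, ue, ud))
          simp only [bStep, if_neg h1, if_pos h2]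
          refine ⟨⟨w, by simp [hw], hwe, hwd⟩, fun v hv => ?_, ?_⟩
          · rcases List.mem_append.mp hv with hv | hv
            · exact hb v hv
            · simp at hv; subst hv; simp; omega
          · rw [show ((some (e1, d1), some ue) :
                Option (Int × Int) × Option Int).2 = some ue from rfl]
            rw [IsMaxOf, hfe, show ((done.filter (fun v => v.2.2 ≠ d1)).map (fun v => v.2.1)) = []
              from hmax]
            exact ⟨by simp, by simp⟩
        | some e2 =>
          show StInv _ (bStep (some (e1, d1), some e2) (us, ue, ud))
          simp only [bStep, if_neg h1, if_pos h2]
          obtain ⟨hm, hmb⟩ := hmax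
          refine ⟨⟨w, by simp [hw], hwe, hwd⟩, fun v hv => ?_, ?_⟩
          · rcases List.mem_append.mp hv with hv | hv
            · exact hb v hv
            · simp at hv; subst hv; simp; omega
          · rw [show ((some (e1, d1), some (max e2 ue)) :
                Option (Int × Int) × Option Int).2 = some (max e2 ue) from rfl]
            rw [IsMaxOf, hfe]
            constructor
            · rcases le_total e2 ue with hle | hle
              · simp [max_eq_right hle]
              · rw [max_eq_left hle]; exact List.mem_append.mpr (Or.inl hm)
            · intro x hx
              rcases List.mem_append.mp hx with hx | hx
              · have := hmb x hx; simp; omega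
              · simp at hx; subst hx; simp
      · -- smaller end from the same device: state unchanged
        rw [not_not] at h2
        subst h2
        show StInv _ (bStep (some (e1, ud), t2) (us, ue, ud))
        simp only [bStep, if_neg h1, if_neg (by simp : ¬ ud ≠ ud)]
        refine ⟨⟨w, by simp [hw], hwe, hwd⟩, fun v hv => ?_, ?_⟩
        · rcases List.mem_append.mp hv with hv | hv
          · exact hb v hv
          · simp at hv; subst hv; simp; omega
        · have hfe : ((done ++ [(us, ue, ud)]).filter (fun v => v.2.2 ≠ ud)).map (fun v => v.2.1)
              = (done.filter (fun v => v.2.2 ≠ ud)).map (fun v => v.2.1) := by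
            simp [List.filter_append]
          show IsMaxOf t2 _
          rw [hfe]
          exact hmax

lemma stInv_foldl {done : List (Int × Int × Int)} {st} (h : StInv done st)
    (l : List (Int × Int × Int)) : StInv (done ++ l) (l.foldl bStep st) := by
  induction l generalizing done st with
  | nil => simpa using h
  | cons x rest ih =>
    have := ih (stInv_step h x)
    simpa using this

lemma bAdvance_eq (e : Int) (rs : List (Int × Int × Int)) (st) :
    bAdvance e rs st = (rs.dropWhile (fun u => decide (u.1 < e)),
      (rs.takeWhile (fun u => decide (u.1 < e))).foldl bStep st) := by
  induction rs generalizing st with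
  | nil => rfl
  | cons x rest ih =>
    by_cases h : x.1 < e
    · simp [bAdvance, h, ih]
    · simp [bAdvance, h]

-- the sweep state answers a query correctly over the processed events
lemma stInv_ans {done : List (Int × Int × Int)} {st} (h : StInv done st) (s i : Int) :
    ((match st.1 with
      | none => true
      | some (e1, d1) =>
        match (if d1 ≠ i then some e1 else st.2) with
        | none => true
        | some b => decide (b ≤ s)) = true)
      ↔ ¬ ∃ u ∈ done, u.2.2 ≠ i ∧ s < u.2.1 := by
  obtain ⟨t1, t2⟩ := st
  match t1 with
  | none =>
    obtain ⟨rfl, rfl⟩ := h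
    simp
  | some (e1, d1) =>
    obtain ⟨⟨w, hw, hwe, hwd⟩, hb, hmax⟩ := h
    by_cases hdi : d1 ≠ i
    · simp only [if_pos hdi]
      constructor
      · intro he ⟨u, hu, _, hse⟩
        have := hb u hu
        simp at he; omega
      · intro hne
        simp only [decide_eq_true_iff]
        by_contra hgt
        exact hne ⟨w, hw, by rw [hwd]; exact hdi, by omega⟩
    · simp only [if_neg hdi]
      rw [not_not] at hdi
      subst hdi
      match t2 with
      | none =>
        simp only [true_iff]
        intro ⟨u, hu, hud, hse⟩
        have : u.2.1 ∈ (done.filter (fun u => u.2.2 ≠ d1)).map (fun u => u.2.1) :=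
          List.mem_map.mpr ⟨u, List.mem_filter.mpr ⟨hu, by simpa using hud⟩, rfl⟩
        rw [show ((done.filter (fun u => u.2.2 ≠ d1)).map (fun u => u.2.1)) = [] from hmax] at this
        simp at this
      | some m =>
        obtain ⟨hm, hmb⟩ := hmax
        constructor
        · intro he ⟨u, hu, hud, hse⟩
          have : u.2.1 ∈ (done.filter (fun u => u.2.2 ≠ d1)).map (fun u => u.2.1) :=
            List.mem_map.mpr ⟨u, List.mem_filter.mpr ⟨hu, by simpa using hud⟩, rfl⟩
          have := hmb _ this
          simp at he; omega
        · intro hne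
          simp only [decide_eq_true_iff]
          by_contra hgt
          obtain ⟨u, hu, hm⟩ := List.mem_map.mp hm
          have hu' := List.mem_filter.mp hu
          exact hne ⟨u, hu'.1, by simpa using hu'.2, by omega⟩

lemma dropWhile_sorted_ge (e : Int) (rs : List (Int × Int × Int))
    (hs : rs.Pairwise (fun a b => a.1 ≤ b.1)) :
    ∀ u ∈ rs.dropWhile (fun u => decide (u.1 < e)), ¬ u.1 < e := by
  induction rs with
  | nil => simp
  | cons x rest ih =>
    rw [List.pairwise_cons] at hs
    by_cases h : x.1 < e
    · simpa [List.dropWhile_cons, h] using ih hs.2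
    · intro u hu
      rw [List.dropWhile_cons, if_neg (by simpa using h)] at hu
      rcases List.mem_cons.mp hu with rfl | hu
      · exact h
      · have := hs.1 u hu; omega

-- pull the recursive call out of the match chain of `bLoop`
lemma ans_bridge (st' : Option (Int × Int) × Option Int) (s i : Int) (k : Bool) :
    (match st'.1 with
     | none => true
     | some (e1, d1) =>
       match (if d1 ≠ i then some e1 else st'.2) with
       | none => true
       | some b => if b ≤ s then true else k)
    = (if (match st'.1 with
           | none => true
           | some (e1, d1) =>
             match (if d1 ≠ i then some e1 else st'.2) with
             | none => true
             | some b => decide (b ≤ s)) = true then true else k) := by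
  obtain ⟨t1, t2⟩ := st'
  match t1 with
  | none => simp
  | some (e1, d1) =>
    by_cases hd : d1 ≠ i
    · simp only [if_pos hd]
      by_cases hb : e1 ≤ s <;> simp [hb]
    · simp only [if_neg hd]
      match t2 with
      | none => simp
      | some e2 => by_cases hb : e2 ≤ s <;> simp [hb]

lemma bLoop_eq (tg : List (Int × Int × Int)) :
    ∀ (qs rs done : List (Int × Int × Int)) (st),
      StInv done st → (done ++ rs).Perm tg →
      (∀ u ∈ done, ∀ q ∈ qs, u.1 < q.2.1) →
      qs.Pairwise (fun a b => a.2.1 ≤ b.2.1) →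
      rs.Pairwise (fun a b => a.1 ≤ b.1) →
      bLoop qs rs st = qs.any (freeB tg) := by
  intro qs
  induction qs with
  | nil => intro rs done st _ _ _ _ _; rfl
  | cons q qs' ih =>
    intro rs done st hst hperm hdone hqs hrs
    rw [List.pairwise_cons] at hqs
    rw [bLoop.eq_def]
    simp only [bAdvance_eq]
    set tk := rs.takeWhile (fun u => decide (u.1 < q.2.1)) with htk
    set rs' := rs.dropWhile (fun u => decide (u.1 < q.2.1)) with hrs'
    set st' := tk.foldl bStep st with hst'
    have hstInv' : StInv (done ++ tk) st' := stInv_foldl hst tk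
    have hperm' : ((done ++ tk) ++ rs').Perm tg := by
      have : (done ++ tk) ++ rs' = done ++ rs := by
        rw [List.append_assoc, htk, hrs', List.takeWhile_append_dropWhile]
      rwa [this]
    have hdone' : ∀ u ∈ done ++ tk, u.1 < q.2.1 := by
      intro u hu
      rcases List.mem_append.mp hu with hu | hu
      · exact hdone u hu q (List.mem_cons_self)
      · simpa using List.mem_takeWhile_imp hu
    have hrsge : ∀ u ∈ rs', ¬ u.1 < q.2.1 := dropWhile_sorted_ge _ _ hrs
    -- the state answers the query correctly w.r.t. the whole tagged list
    have hfree_iff : freeB tg q = true ↔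
        ¬ ∃ u ∈ tg, u.2.2 ≠ q.2.2 ∧ u.1 < q.2.1 ∧ q.1 < u.2.1 := by
      unfold freeB
      simp [and_assoc]
    have hex : (∃ u ∈ tg, u.2.2 ≠ q.2.2 ∧ u.1 < q.2.1 ∧ q.1 < u.2.1) ↔
        (∃ u ∈ done ++ tk, u.2.2 ≠ q.2.2 ∧ q.1 < u.2.1) := by
      constructor
      · rintro ⟨u, hu, hd, hs, he⟩
        rcases List.mem_append.mp (hperm'.mem_iff.mpr hu) with hu' | hu'
        · exact ⟨u, hu', hd, he⟩
        · exact absurd hs (hrsge u hu')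
      · rintro ⟨u, hu, hd, he⟩
        exact ⟨u, hperm'.mem_iff.mp (List.mem_append.mpr (Or.inl hu)), hd, hdone' u hu, he⟩
    have hkey : (¬ ∃ u ∈ done ++ tk, u.2.2 ≠ q.2.2 ∧ q.1 < u.2.1) ↔ freeB tg q = true := by
      rw [hfree_iff]
      exact not_congr hex.symm
    have hans := stInv_ans hstInv' q.1 q.2.2
    rw [ans_bridge]
    by_cases hf : freeB tg q = true
    · rw [if_pos (hans.mpr (hkey.mpr hf))]
      simp [hf]
    · have : ¬ ((match st'.1 with
        | none => true
        | some (e1, d1) =>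
          match (if d1 ≠ q.2.2 then some e1 else st'.2) with
          | none => true
          | some b => decide (b ≤ q.1)) = true) := by
        intro hcontra
        exact hf (hkey.mp (hans.mp hcontra))
      rw [if_neg this]
      have hdone'' : ∀ u ∈ done ++ tk, ∀ q' ∈ qs', u.1 < q'.2.1 := by
        intro u hu q' hq'
        have h1 := hdone' u hu
        have h2 := hqs.1 q' hq'
        omega
      have hrs'' : rs'.Pairwise (fun a b => a.1 ≤ b.1) :=
        List.Pairwise.sublist (List.dropWhile_sublist _) hrs
      rw [ih rs' (done ++ tk) st' hstInv' hperm' hdone'' hqs.2 hrs'']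
      simp [List.any_cons, hf]

lemma checkB_eq_spec (ts : List (List (Int × Int))) :
    check_overlap_alt ts = (bTagged ts).any (freeB (bTagged ts)) := by
  unfold check_overlap_alt
  rw [bLoop_eq (bTagged ts) _ _ [] (none, none) ⟨rfl, rfl⟩
    (by simpa using PySem.List.sorted_perm (bTagged ts) (fun t => t.1) false)
    (by simp)
    (PySem.List.sorted_pairwise (bTagged ts) (fun t => t.2.1))
    (PySem.List.sorted_pairwise (bTagged ts) (fun t => t.1))]
  exact List.Perm.any_eq (PySem.List.sorted_perm (bTagged ts) (fun t => t.2.1) false)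

-- ===== VERDICT (by name: the statement is the Claim_ definition above) =====
theorem check_overlap_spec : Claim_equal_check_overlap := by
  intro ts _
  unfold Spec_check_overlap
  rw [checkA_eq_spec, checkB_eq_spec]
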